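-- pv_equiv track=rewrite | github.com/sharronesofer/visual_dm | scripts/analysis/task_fixes/task_36_advanced_syntax_fixer.py | _fix_bracket_mismatches
-- ===== SOURCE A (Python) =====
-- def _fix_bracket_mismatches(content: str) -> str:
--     """Fix bracket, parenthesis, and brace mismatches"""
--
--     # Count and balance brackets
--     open_brackets = {'(': 0, '[': 0, '{': 0}
--     close_brackets = {')': '(', ']': '[', '}': '{'}
--
--     lines = content.split('\n')
--     fixed_lines = []
--
--     for line in lines:
--         # Count brackets in this line
--         for char in line:
--             if char in open_brackets:
--                 open_brackets[char] += 1
--             elif char in close_brackets: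
--                 matching_open = close_brackets[char]
--                 if open_brackets[matching_open] > 0:
--                     open_brackets[matching_open] -= 1
--                 else:
--                     # Unmatched closing bracket - remove it
--                     line = line.replace(char, '', 1)
--
--         fixed_lines.append(line)
--
--     return '\n'.join(fixed_lines)
-- ===== SOURCE B (Python) =====
-- def _unmatched(line, oc, cc, stock):
--     """Per-type prefix-deficit count: how many cc in line are unmatched given
--     `stock` carried-over open oc's, and the new stock after the line."""
--     bal = 0
--     deficit = 0
--     for ch in line:
--         if ch == oc:
--             bal += 1
--         elif ch == cc:
--             bal -= 1
--             if -bal > deficit: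
--                 deficit = -bal
--     removed = deficit - stock
--     if removed < 0:
--         removed = 0
--     return removed, stock + bal + removed
--
--
-- def _drop_first(line, rp, rs, rb):
--     """Drop the first rp ')' , rs ']' and rb '}' occurrences of line."""
--     kept = []
--     for ch in line:
--         if ch == ')' and rp > 0:
--             rp -= 1
--         elif ch == ']' and rs > 0:
--             rs -= 1
--         elif ch == '}' and rb > 0:
--             rb -= 1
--         else:
--             kept.append(ch)
--     return ''.join(kept)
--
--
-- def _fix_bracket_mismatches(content: str) -> str:
--     """Fix bracket, parenthesis, and brace mismatches.
--
--     Each bracket type is independent, so per line the number of unmatched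
--     closers of a type is max(0, max-prefix-deficit - carried-over opens);
--     compute that closed count per type, then drop the first k closers of
--     each type in one rebuild pass."""
--     open_p = open_s = open_b = 0
--     fixed = []
--     for line in content.split('\n'):
--         rp, open_p = _unmatched(line, '(', ')', open_p)
--         rs, open_s = _unmatched(line, '[', ']', open_s)
--         rb, open_b = _unmatched(line, '{', '}', open_b)
--         fixed.append(_drop_first(line, rp, rs, rb))
--     return '\n'.join(fixed)
-- ===== Notes on version B (the rewrite author's own statement) =====
-- stated objective: alternative
-- what changed: Instead of A's stateful dict simulation that mutates the line with a replace-first-occurrence call per unmatched closer, B treats the three bracket types independently and computes each line's unmatched-closer count per type by the closed prefix-deficit formula max(0, max-prefix-deficit - carried opens), then rebuilds the line once dropping the first k closers of each type.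
import Mathlib
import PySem

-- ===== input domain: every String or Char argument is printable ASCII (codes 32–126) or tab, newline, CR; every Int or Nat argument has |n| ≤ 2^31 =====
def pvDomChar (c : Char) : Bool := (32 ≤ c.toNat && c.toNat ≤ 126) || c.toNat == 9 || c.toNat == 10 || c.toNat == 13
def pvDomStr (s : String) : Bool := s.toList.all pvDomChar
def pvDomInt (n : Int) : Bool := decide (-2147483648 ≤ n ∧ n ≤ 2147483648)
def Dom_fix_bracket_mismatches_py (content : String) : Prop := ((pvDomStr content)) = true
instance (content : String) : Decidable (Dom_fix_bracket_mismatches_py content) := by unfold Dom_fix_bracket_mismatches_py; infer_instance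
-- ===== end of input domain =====

-- B replaces A's stateful dict simulation (with repeated replace-first-occurrence line
-- mutation) by three independent per-type prefix-deficit counts and one rebuild pass
-- per line (objective: an alternative algorithm, same result).

-- ===== PORT A =====
-- `close_brackets = {')': '(', ']': '[', '}': '{'}`
def pvCloseBrackets : PySem.Dict Char Char := PySem.Dict.ofList [(')', '('), (']', '['), ('}', '{')]

-- Hand port of Python `line.replace(ch, '', 1)` (single-character pattern, empty
-- replacement, count 1): removes the first occurrence of `ch`; exact on that case.
def pvReplaceOnce : List Char → Char → List Char
  | [], _ => []
  | x :: xs, ch => if x == ch then xs else x :: pvReplaceOnce xs ch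

-- A's inner `for char in line`: the iterator runs over the ORIGINAL characters
-- while `cur` is the progressively mutated line.
def pvLineScanA : PySem.Dict Char Int → List Char → List Char → PySem.Dict Char Int × List Char
  | opens, cur, [] => (opens, cur)
  | opens, cur, ch :: rest =>
    if opens.contains ch then
      pvLineScanA (opens.modify ch 0 (· + 1)) cur rest
    else
      match pvCloseBrackets.get? ch with
      | some m =>
        if opens.getD m 0 > 0 then pvLineScanA (opens.modify m 0 (· - 1)) cur rest
        else pvLineScanA opens (pvReplaceOnce cur ch) rest
      | none => pvLineScanA opens cur rest

-- A's outer `for line in lines` (open_brackets carries over between lines; lines appended in order)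
def pvLinesA : PySem.Dict Char Int → List (List Char) → List (List Char)
  | _, [] => []
  | opens, l :: ls =>
    let r := pvLineScanA opens l l
    r.2 :: pvLinesA r.1 ls

def fix_bracket_mismatches_py (content : String) : String :=
  let openBrackets : PySem.Dict Char Int := PySem.Dict.ofList [('(', 0), ('[', 0), ('{', 0)]
  let lines := PySem.Chars.splitOn content.toList ['\n']
  String.mk (PySem.Chars.join ['\n'] (pvLinesA openBrackets lines))

-- ===== PORT B =====
-- `_unmatched(line, oc, cc, stock)`: the for-loop over `line` carrying (bal, deficit)
def pvUnmatched (line : List Char) (oc cc : Char) (stock : Int) : Int × Int :=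
  let bd := line.foldl (fun (s : Int × Int) ch =>
      if ch = oc then (s.1 + 1, s.2)
      else if ch = cc then
        let bal := s.1 - 1
        (bal, if -bal > s.2 then -bal else s.2)
      else s) (0, 0)
  let removed := if bd.2 - stock < 0 then 0 else bd.2 - stock
  (removed, stock + bd.1 + removed)

-- `_drop_first(line, rp, rs, rb)`
def pvDropFirst : List Char → Int → Int → Int → List Char
  | [], _, _, _ => []
  | ch :: t, rp, rs, rb =>
    if ch = ')' ∧ rp > 0 then pvDropFirst t (rp - 1) rs rb
    else if ch = ']' ∧ rs > 0 then pvDropFirst t rp (rs - 1) rb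
    else if ch = '}' ∧ rb > 0 then pvDropFirst t rp rs (rb - 1)
    else ch :: pvDropFirst t rp rs rb

-- B's outer loop: three per-type stocks carried across lines
def pvLinesB : Int → Int → Int → List (List Char) → List (List Char)
  | _, _, _, [] => []
  | op, os, ob, l :: ls =>
    let p := pvUnmatched l '(' ')' op
    let s := pvUnmatched l '[' ']' os
    let b := pvUnmatched l '{' '}' ob
    pvDropFirst l p.1 s.1 b.1 :: pvLinesB p.2 s.2 b.2 ls

def fix_bracket_mismatches_py_alt (content : String) : String :=
  let lines := PySem.Chars.splitOn content.toList ['\n']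
  String.mk (PySem.Chars.join ['\n'] (pvLinesB 0 0 0 lines))

-- ===== PRECONDITION & SPEC =====
def Spec_fix_bracket_mismatches_py (content : String) (out : String) : Prop := out = fix_bracket_mismatches_py_alt content
instance (content : String) (out : String) : Decidable (Spec_fix_bracket_mismatches_py content out) := by unfold Spec_fix_bracket_mismatches_py; infer_instance

-- ===== CLAIM (what is proved, stated in full; the proofs are below) =====
def Claim_equal_fix_bracket_mismatches_py : Prop := ∀ (content : String), Dom_fix_bracket_mismatches_py content → Spec_fix_bracket_mismatches_py content (fix_bracket_mismatches_py content)

-- ===== LEMMAS AND PROOFS =====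

-- Ghost scan: same control flow as A's phase; records the final `opens`
-- and the sequence of characters A erases, in scan order.
def pvGhost : PySem.Dict Char Int → List Char → PySem.Dict Char Int × List Char
  | opens, [] => (opens, [])
  | opens, ch :: rest =>
    if opens.contains ch then
      pvGhost (opens.modify ch 0 (· + 1)) rest
    else
      match pvCloseBrackets.get? ch with
      | some m =>
        if opens.getD m 0 > 0 then pvGhost (opens.modify m 0 (· - 1)) rest
        else
          let r := pvGhost opens rest
          (r.1, ch :: r.2)
      | none => pvGhost opens rest

theorem pvReplaceOnce_eq_erase (l : List Char) (ch : Char) : pvReplaceOnce l ch = l.erase ch := by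
  induction l with
  | nil => rfl
  | cons x xs ih => simp [pvReplaceOnce, List.erase_cons, ih]

theorem pvLineScanA_ghost (chars : List Char) (opens : PySem.Dict Char Int) (cur : List Char) :
    pvLineScanA opens cur chars =
      ((pvGhost opens chars).1, (pvGhost opens chars).2.foldl pvReplaceOnce cur) := by
  induction chars generalizing opens cur with
  | nil => rfl
  | cons ch rest ih =>
    simp only [pvLineScanA, pvGhost]
    split
    · exact ih _ _
    · split
      · split
        · exact ih _ _
        · simp [ih]
      · exact ih _ _

theorem pvCloseBrackets_mk : pvCloseBrackets = PySem.Dict.mk [(')', '('), (']', '['), ('}', '{')] := by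
  decide

theorem pvCloseBrackets_get?_none (e : Char) (h1 : ¬ e = ')') (h2 : ¬ e = ']') (h3 : ¬ e = '}') :
    pvCloseBrackets.get? e = none := by
  rw [pvCloseBrackets_mk]
  simp [beq_iff_eq, Ne.symm h1, Ne.symm h2, Ne.symm h3, PySem.Dict.get?]

theorem pvGhost_closers (chars : List Char) (opens : PySem.Dict Char Int) :
    ∀ e ∈ (pvGhost opens chars).2, e = ')' ∨ e = ']' ∨ e = '}' := by
  induction chars generalizing opens with
  | nil => simp [pvGhost]
  | cons ch rest ih =>
    simp only [pvGhost]
    split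
    · exact ih _
    · split
      · split
        · exact ih _
        · rename_i m hm _
          intro e he
          simp only [List.mem_cons] at he
          rcases he with rfl | he
          · by_cases h1 : e = ')' ; · exact Or.inl h1
            by_cases h2 : e = ']' ; · exact Or.inr (Or.inl h2)
            by_cases h3 : e = '}' ; · exact Or.inr (Or.inr h3)
            exact absurd hm (by simp [pvCloseBrackets_get?_none e h1 h2 h3])
          · exact ih _ _ he
      · exact ih _

theorem pvGhost_count (chars : List Char) (opens : PySem.Dict Char Int) (c : Char) :
    (pvGhost opens chars).2.count c ≤ chars.count c := by
  induction chars generalizing opens with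
  | nil => simp [pvGhost]
  | cons ch rest ih =>
    simp only [pvGhost]
    split
    · exact le_trans (ih _) (List.count_le_count_cons ..)
    · split
      · split
        · exact le_trans (ih _) (List.count_le_count_cons ..)
        · simp only [List.count_cons]
          have := ih opens
          omega
      · exact le_trans (ih _) (List.count_le_count_cons ..)

-- per-type balance and prefix deficit
def pvBal (oc cc : Char) (l : List Char) : Int := (l.count oc : Int) - l.count cc

def pvDf (oc cc : Char) : List Char → Int
  | [] => 0
  | ch :: t => if ch = oc then max 0 (pvDf oc cc t - 1)
               else if ch = cc then 1 + pvDf oc cc t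
               else pvDf oc cc t

theorem pvDf_nonneg (oc cc : Char) (l : List Char) : 0 ≤ pvDf oc cc l := by
  induction l with
  | nil => simp [pvDf]
  | cons ch t ih => simp only [pvDf]; split_ifs <;> omega

theorem pvDf_ge_negBal (oc cc : Char) (hne : oc ≠ cc) (l : List Char) :
    -(pvBal oc cc l) ≤ pvDf oc cc l := by
  induction l with
  | nil => simp [pvDf, pvBal]
  | cons ch t ih =>
    simp only [pvBal, List.count_cons] at ih ⊢
    simp only [pvDf]
    by_cases h1 : ch = oc
    · subst h1; simp [hne, Ne.symm hne]; omega
    · by_cases h2 : ch = cc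
      · subst h2; simp [h1, Ne.symm h1]; omega
      · simp [h1, h2, Ne.symm h1, Ne.symm h2]; omega

-- the fold in pvUnmatched, characterized
theorem pvUnmatched_fold (oc cc : Char) (hne : oc ≠ cc) (l : List Char) (b0 d0 : Int)
    (h : -b0 ≤ d0) :
    l.foldl (fun (s : Int × Int) ch =>
      if ch = oc then (s.1 + 1, s.2)
      else if ch = cc then
        let bal := s.1 - 1
        (bal, if -bal > s.2 then -bal else s.2)
      else s) (b0, d0) = (b0 + pvBal oc cc l, max d0 (pvDf oc cc l - b0)) := by
  induction l generalizing b0 d0 with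
  | nil =>
    simp only [List.foldl_nil, pvBal, pvDf, List.count_nil]
    rw [Prod.mk.injEq]
    exact ⟨by omega, by omega⟩
  | cons ch t ih =>
    simp only [List.foldl_cons]
    by_cases h1 : ch = oc
    · subst h1
      simp only [eq_self_iff_true, if_true, reduceIte]
      rw [ih (b0 + 1) d0 (by omega)]
      have hd := pvDf_nonneg ch cc t
      simp only [pvBal, pvDf, List.count_cons, eq_self_iff_true, if_true, beq_iff_eq,
        if_neg (show ¬ cc = ch from Ne.symm hne), if_neg hne]
      rw [Prod.mk.injEq]
      exact ⟨by push_cast; omega, by omega⟩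
    · by_cases h2 : ch = cc
      · subst h2
        simp only [h1, if_false, eq_self_iff_true, if_true]
        rw [ih (b0 - 1) (if -(b0 - 1) > d0 then -(b0 - 1) else d0) (by split_ifs <;> omega)]
        have hd := pvDf_nonneg oc ch t
        simp only [pvBal, pvDf, List.count_cons, h1, if_false, eq_self_iff_true, if_true,
          beq_iff_eq, if_neg (show ¬ oc = ch from fun he => h1 he.symm)]
        rw [Prod.mk.injEq]
        constructor
        · push_cast; omega
        · split_ifs <;> simp only [max_def] <;> split_ifs <;> omega
      · simp only [h1, h2, if_false]
        rw [ih b0 d0 h]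
        simp only [pvBal, pvDf, List.count_cons, h1, h2, if_false, beq_iff_eq,
          if_neg (show ¬ oc = ch from fun he => h1 he.symm),
          if_neg (show ¬ cc = ch from fun he => h2 he.symm)]
        rw [Prod.mk.injEq]
        exact ⟨by push_cast; omega, rfl⟩

theorem pvUnmatched_eq (l : List Char) (oc cc : Char) (hne : oc ≠ cc) (stock : Int) :
    pvUnmatched l oc cc stock =
      (max 0 (pvDf oc cc l - stock), stock + pvBal oc cc l + max 0 (pvDf oc cc l - stock)) := by
  unfold pvUnmatched
  rw [pvUnmatched_fold oc cc hne l 0 0 (by omega)]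
  have := pvDf_nonneg oc cc l
  simp only
  rw [Prod.mk.injEq]
  exact ⟨by split_ifs <;> omega, by split_ifs <;> omega⟩

-- the concrete opens dict of A, as three counters
def pvO (a b c : Int) : PySem.Dict Char Int := PySem.Dict.mk [('(', a), ('[', b), ('{', c)]

theorem pvO_contains (a b c : Int) (e : Char) :
    (pvO a b c).contains e = (decide (e = '(') || decide (e = '[') || decide (e = '{')) := by
  simp only [pvO, PySem.Dict.contains]
  by_cases h1 : e = '(' ; · simp [h1]
  by_cases h2 : e = '[' ; · simp [h2]
  by_cases h3 : e = '{' ; · simp [h3]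
  simp [h1, h2, h3, Ne.symm h1, Ne.symm h2, Ne.symm h3]

theorem pvO_modify_p (a b c : Int) (f : Int → Int) : (pvO a b c).modify '(' 0 f = pvO (f a) b c := by
  simp [pvO, PySem.Dict.modify, PySem.Dict.getD, PySem.Dict.get?, PySem.Dict.insert]

theorem pvO_modify_s (a b c : Int) (f : Int → Int) : (pvO a b c).modify '[' 0 f = pvO a (f b) c := by
  simp [pvO, PySem.Dict.modify, PySem.Dict.getD, PySem.Dict.get?, PySem.Dict.insert]

theorem pvO_modify_b (a b c : Int) (f : Int → Int) : (pvO a b c).modify '{' 0 f = pvO a b (f c) := by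
  simp [pvO, PySem.Dict.modify, PySem.Dict.getD, PySem.Dict.get?, PySem.Dict.insert]

theorem pvO_getD_p (a b c : Int) : (pvO a b c).getD '(' 0 = a := by
  simp [pvO, PySem.Dict.getD, PySem.Dict.get?]

theorem pvO_getD_s (a b c : Int) : (pvO a b c).getD '[' 0 = b := by
  simp [pvO, PySem.Dict.getD, PySem.Dict.get?]

theorem pvO_getD_b (a b c : Int) : (pvO a b c).getD '{' 0 = c := by
  simp [pvO, PySem.Dict.getD, PySem.Dict.get?]

-- the main per-line characterization of A's ghost scan by the per-type formulas
theorem pvGhost_char (l : List Char) (a b c : Int) (ha : 0 ≤ a) (hb : 0 ≤ b) (hc : 0 ≤ c) :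
    (pvGhost (pvO a b c) l).1 =
      pvO (a + pvBal '(' ')' l + max 0 (pvDf '(' ')' l - a))
          (b + pvBal '[' ']' l + max 0 (pvDf '[' ']' l - b))
          (c + pvBal '{' '}' l + max 0 (pvDf '{' '}' l - c)) ∧
    ((pvGhost (pvO a b c) l).2.count ')' : Int) = max 0 (pvDf '(' ')' l - a) ∧
    ((pvGhost (pvO a b c) l).2.count ']' : Int) = max 0 (pvDf '[' ']' l - b) ∧
    ((pvGhost (pvO a b c) l).2.count '}' : Int) = max 0 (pvDf '{' '}' l - c) := by
  induction l generalizing a b c with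
  | nil =>
    refine ⟨?_, ?_, ?_, ?_⟩ <;> simp [pvGhost, pvBal, pvDf, pvO] <;> omega
  | cons ch t ih =>
    have hd1 := pvDf_nonneg '(' ')' t
    have hd2 := pvDf_nonneg '[' ']' t
    have hd3 := pvDf_nonneg '{' '}' t
    simp only [pvGhost, pvO_contains]
    by_cases h1 : ch = '('
    · subst h1
      simp only [decide_true, Bool.true_or, Bool.or_true, if_true, pvO_modify_p]
      obtain ⟨g1, g2, g3, g4⟩ := ih (a + 1) b c (by omega) hb hc
      refine ⟨?_, ?_, ?_, ?_⟩ <;>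
        (try simp only [List.count_cons]) <;> (try push_cast) <;>
          (try simp only [g1, g2, g3, g4]) <;>
          simp [pvBal, pvDf, List.count_cons, pvO] <;> omega
    by_cases h2 : ch = '['
    · subst h2
      simp only [decide_true, Bool.true_or, Bool.or_true, Bool.false_or, if_true, pvO_modify_s]
      obtain ⟨g1, g2, g3, g4⟩ := ih a (b + 1) c ha (by omega) hc
      refine ⟨?_, ?_, ?_, ?_⟩ <;>
        (try simp only [List.count_cons]) <;> (try push_cast) <;>
          (try simp only [g1, g2, g3, g4]) <;>
          simp [pvBal, pvDf, List.count_cons, pvO] <;> omega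
    by_cases h3 : ch = '{'
    · subst h3
      simp only [decide_true, Bool.true_or, Bool.or_true, Bool.false_or, if_true, pvO_modify_b]
      obtain ⟨g1, g2, g3, g4⟩ := ih a b (c + 1) ha hb (by omega)
      refine ⟨?_, ?_, ?_, ?_⟩ <;>
        (try simp only [List.count_cons]) <;> (try push_cast) <;>
          (try simp only [g1, g2, g3, g4]) <;>
          simp [pvBal, pvDf, List.count_cons, pvO] <;> omega
    simp only [h1, h2, h3, decide_false, Bool.or_self, Bool.false_or, Bool.false_eq_true, if_false]
    by_cases h4 : ch = ')'
    · subst h4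
      rw [show pvCloseBrackets.get? ')' = some '(' from by decide]
      simp only [pvO_getD_p]
      by_cases hpos : a > 0
      · simp only [if_pos hpos, pvO_modify_p]
        obtain ⟨g1, g2, g3, g4⟩ := ih (a - 1) b c (by omega) hb hc
        refine ⟨?_, ?_, ?_, ?_⟩ <;>
          (try simp only [List.count_cons]) <;> (try push_cast) <;>
          (try simp only [g1, g2, g3, g4]) <;>
          simp [pvBal, pvDf, List.count_cons, pvO] <;> omega
      · have ha0 : a = 0 := by omega
        subst ha0
        simp only [if_neg hpos]
        obtain ⟨g1, g2, g3, g4⟩ := ih 0 b c (by omega) hb hc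
        refine ⟨?_, ?_, ?_, ?_⟩ <;>
          (try simp only [List.count_cons]) <;> (try push_cast) <;>
          (try simp only [g1, g2, g3, g4]) <;>
          simp [pvBal, pvDf, List.count_cons, pvO] <;> omega
    by_cases h5 : ch = ']'
    · subst h5
      rw [show pvCloseBrackets.get? ']' = some '[' from by decide]
      simp only [pvO_getD_s]
      by_cases hpos : b > 0
      · simp only [if_pos hpos, pvO_modify_s]
        obtain ⟨g1, g2, g3, g4⟩ := ih a (b - 1) c ha (by omega) hc
        refine ⟨?_, ?_, ?_, ?_⟩ <;>
          (try simp only [List.count_cons]) <;> (try push_cast) <;>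
          (try simp only [g1, g2, g3, g4]) <;>
          simp [pvBal, pvDf, List.count_cons, pvO] <;> omega
      · have hb0 : b = 0 := by omega
        subst hb0
        simp only [if_neg hpos]
        obtain ⟨g1, g2, g3, g4⟩ := ih a 0 c ha (by omega) hc
        refine ⟨?_, ?_, ?_, ?_⟩ <;>
          (try simp only [List.count_cons]) <;> (try push_cast) <;>
          (try simp only [g1, g2, g3, g4]) <;>
          simp [pvBal, pvDf, List.count_cons, pvO] <;> omega
    by_cases h6 : ch = '}'
    · subst h6
      rw [show pvCloseBrackets.get? '}' = some '{' from by decide]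
      simp only [pvO_getD_b]
      by_cases hpos : c > 0
      · simp only [if_pos hpos, pvO_modify_b]
        obtain ⟨g1, g2, g3, g4⟩ := ih a b (c - 1) ha hb (by omega)
        refine ⟨?_, ?_, ?_, ?_⟩ <;>
          (try simp only [List.count_cons]) <;> (try push_cast) <;>
          (try simp only [g1, g2, g3, g4]) <;>
          simp [pvBal, pvDf, List.count_cons, pvO] <;> omega
      · have hc0 : c = 0 := by omega
        subst hc0
        simp only [if_neg hpos]
        obtain ⟨g1, g2, g3, g4⟩ := ih a b 0 ha hb (by omega)
        refine ⟨?_, ?_, ?_, ?_⟩ <;>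
          (try simp only [List.count_cons]) <;> (try push_cast) <;>
          (try simp only [g1, g2, g3, g4]) <;>
          simp [pvBal, pvDf, List.count_cons, pvO] <;> omega
    rw [pvCloseBrackets_get?_none ch h4 h5 h6]
    obtain ⟨g1, g2, g3, g4⟩ := ih a b c ha hb hc
    refine ⟨?_, ?_, ?_, ?_⟩ <;>
      (try simp only [List.count_cons]) <;> (try push_cast) <;>
      (try simp only [g1, g2, g3, g4]) <;>
      simp [pvBal, pvDf, List.count_cons, pvO, h1, h2, h3, h4, h5, h6,
            Ne.symm h1, Ne.symm h2, Ne.symm h3, Ne.symm h4, Ne.symm h5, Ne.symm h6] <;> omega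

-- drop-first lemmas: erasing the ghost chars one by one equals one pvDropFirst pass
theorem pvDropFirst_zero (line : List Char) : pvDropFirst line 0 0 0 = line := by
  induction line with
  | nil => rfl
  | cons x xs ih => simp [pvDropFirst, ih]

theorem pvDropFirst_bump_p (line : List Char) (a b c : Int) (ha : 0 ≤ a) :
    pvDropFirst line (a + 1) b c = pvDropFirst (line.erase ')') a b c := by
  induction line generalizing a b c with
  | nil => rfl
  | cons x xs ih =>
    by_cases h1 : x = ')'
    · subst h1
      rw [List.erase_cons_head]
      simp [pvDropFirst, show (0:Int) < a + 1 by omega]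
    · rw [List.erase_cons_tail (by simp [h1])]
      simp only [pvDropFirst]
      rw [if_neg (show ¬(x = ')' ∧ a + 1 > 0) from fun h => h1 h.1),
          if_neg (show ¬(x = ')' ∧ a > 0) from fun h => h1 h.1)]
      by_cases h2 : x = ']' ∧ b > 0
      · rw [if_pos h2, if_pos h2]; exact ih _ _ _ ha
      · rw [if_neg h2, if_neg h2]
        by_cases h3 : x = '}' ∧ c > 0
        · rw [if_pos h3, if_pos h3]; exact ih _ _ _ ha
        · rw [if_neg h3, if_neg h3, ih _ _ _ ha]

theorem pvDropFirst_bump_s (line : List Char) (a b c : Int) (hb : 0 ≤ b) :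
    pvDropFirst line a (b + 1) c = pvDropFirst (line.erase ']') a b c := by
  induction line generalizing a b c with
  | nil => rfl
  | cons x xs ih =>
    by_cases h1 : x = ']'
    · subst h1
      rw [List.erase_cons_head]
      simp [pvDropFirst, show (0:Int) < b + 1 by omega]
    · rw [List.erase_cons_tail (by simp [h1])]
      simp only [pvDropFirst]
      by_cases h2 : x = ')' ∧ a > 0
      · rw [if_pos h2, if_pos h2]; exact ih _ _ _ hb
      · rw [if_neg h2, if_neg h2,
            if_neg (show ¬(x = ']' ∧ b + 1 > 0) from fun h => h1 h.1),
            if_neg (show ¬(x = ']' ∧ b > 0) from fun h => h1 h.1)]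
        by_cases h3 : x = '}' ∧ c > 0
        · rw [if_pos h3, if_pos h3]; exact ih _ _ _ hb
        · rw [if_neg h3, if_neg h3, ih _ _ _ hb]

theorem pvDropFirst_bump_b (line : List Char) (a b c : Int) (hc : 0 ≤ c) :
    pvDropFirst line a b (c + 1) = pvDropFirst (line.erase '}') a b c := by
  induction line generalizing a b c with
  | nil => rfl
  | cons x xs ih =>
    by_cases h1 : x = '}'
    · subst h1
      rw [List.erase_cons_head]
      simp [pvDropFirst, show (0:Int) < c + 1 by omega]
    · rw [List.erase_cons_tail (by simp [h1])]
      simp only [pvDropFirst]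
      by_cases h2 : x = ')' ∧ a > 0
      · rw [if_pos h2, if_pos h2]; exact ih _ _ _ hc
      · rw [if_neg h2, if_neg h2]
        by_cases h3 : x = ']' ∧ b > 0
        · rw [if_pos h3, if_pos h3]; exact ih _ _ _ hc
        · rw [if_neg h3, if_neg h3,
              if_neg (show ¬(x = '}' ∧ c + 1 > 0) from fun h => h1 h.1),
              if_neg (show ¬(x = '}' ∧ c > 0) from fun h => h1 h.1),
              ih _ _ _ hc]

-- crux: erasing the chars of s one by one (leftmost occurrence each time) is the
-- simultaneous "drop the first (count of each closer in s) occurrences" pass.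
theorem pvEraseFold_eq_dropFirst (s line : List Char)
    (hc : ∀ e ∈ s, e = ')' ∨ e = ']' ∨ e = '}')
    (hb : ∀ ch, s.count ch ≤ line.count ch) :
    s.foldl pvReplaceOnce line = pvDropFirst line (s.count ')') (s.count ']') (s.count '}') := by
  induction s generalizing line with
  | nil => simp [pvDropFirst_zero]
  | cons e t ih =>
    have htc : ∀ x ∈ t, x = ')' ∨ x = ']' ∨ x = '}' := fun x hx => hc x (List.mem_cons_of_mem _ hx)
    have hcount : ∀ ch, t.count ch ≤ (line.erase e).count ch := by
      intro ch
      have h0 := hb ch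
      rw [List.count_cons] at h0
      rw [List.count_erase]
      by_cases hbe : e = ch
      · subst hbe
        simp only [BEq.rfl, if_true] at h0 ⊢
        omega
      · rw [if_neg (by simpa using hbe)]
        rw [if_neg (by simpa using hbe)] at h0
        omega
    rcases hc e (List.mem_cons_self ..) with rfl | rfl | rfl
    · have e1 : ((List.cons ')' t).count ')' : Int) = (t.count ')' : Int) + 1 := by
        simp [List.count_cons]
      have e2 : ((List.cons ')' t).count ']' : Int) = (t.count ']' : Int) := by
        simp [List.count_cons]
      have e3 : ((List.cons ')' t).count '}' : Int) = (t.count '}' : Int) := by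
        simp [List.count_cons]
      rw [List.foldl_cons, pvReplaceOnce_eq_erase, e1, e2, e3,
          pvDropFirst_bump_p _ _ _ _ (Int.natCast_nonneg _), ih _ htc hcount]
    · have e1 : ((List.cons ']' t).count ')' : Int) = (t.count ')' : Int) := by
        simp [List.count_cons]
      have e2 : ((List.cons ']' t).count ']' : Int) = (t.count ']' : Int) + 1 := by
        simp [List.count_cons]
      have e3 : ((List.cons ']' t).count '}' : Int) = (t.count '}' : Int) := by
        simp [List.count_cons]
      rw [List.foldl_cons, pvReplaceOnce_eq_erase, e1, e2, e3,
          pvDropFirst_bump_s _ _ _ _ (Int.natCast_nonneg _), ih _ htc hcount]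
    · have e1 : ((List.cons '}' t).count ')' : Int) = (t.count ')' : Int) := by
        simp [List.count_cons]
      have e2 : ((List.cons '}' t).count ']' : Int) = (t.count ']' : Int) := by
        simp [List.count_cons]
      have e3 : ((List.cons '}' t).count '}' : Int) = (t.count '}' : Int) + 1 := by
        simp [List.count_cons]
      rw [List.foldl_cons, pvReplaceOnce_eq_erase, e1, e2, e3,
          pvDropFirst_bump_b _ _ _ _ (Int.natCast_nonneg _), ih _ htc hcount]

theorem pvLines_eq (ls : List (List Char)) (a b c : Int) (ha : 0 ≤ a) (hb : 0 ≤ b) (hc : 0 ≤ c) :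
    pvLinesA (pvO a b c) ls = pvLinesB a b c ls := by
  induction ls generalizing a b c with
  | nil => rfl
  | cons l t ih =>
    obtain ⟨g1, g2, g3, g4⟩ := pvGhost_char l a b c ha hb hc
    have hp := pvUnmatched_eq l '(' ')' (by decide) a
    have hs := pvUnmatched_eq l '[' ']' (by decide) b
    have hbb := pvUnmatched_eq l '{' '}' (by decide) c
    simp only [pvLinesA, pvLinesB, pvLineScanA_ghost, hp, hs, hbb]
    rw [List.cons.injEq]
    constructor
    · rw [pvEraseFold_eq_dropFirst _ _ (pvGhost_closers l _) (fun ch => pvGhost_count l _ ch),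
          g2, g3, g4]
    · rw [g1]
      have d1 := pvDf_ge_negBal '(' ')' (by decide) l
      have d2 := pvDf_ge_negBal '[' ']' (by decide) l
      have d3 := pvDf_ge_negBal '{' '}' (by decide) l
      exact ih _ _ _ (by omega) (by omega) (by omega)

-- ===== VERDICT (by name: the statement is the Claim_ definition above) =====
theorem fix_bracket_mismatches_py_spec : Claim_equal_fix_bracket_mismatches_py := by
  intro content _
  unfold Spec_fix_bracket_mismatches_py fix_bracket_mismatches_py fix_bracket_mismatches_py_alt
  have h := fun ls => pvLines_eq ls 0 0 0 (by omega) (by omega) (by omega)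
  simp only [show (PySem.Dict.ofList [('(', (0:Int)), ('[', 0), ('{', 0)]) = pvO 0 0 0 from by decide, h]
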